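-- pv_equiv track=rewrite | github.com/PeterLuschny/tabl | src/_tabltypes.py | SeqString
-- ===== SOURCE A (Python) =====
-- def SeqString(seq: list[int], maxlen: int, offset: int = 0) -> str:
--     """
--     Converts a sequence of integers into a string representation.
--
--     Args:
--         seq (list[int]): The sequence of integers to be converted.
--         maxlen (int): The maximum length of the resulting string.
--         offset (int, optional): The starting index of the sequence. Defaults to 0.
--
--     Returns:
--         str: The string representation of the sequence.
--
--     """
--     seqstr = ""
--     maxl = 0
--     for trm in seq[offset:]:
--         s = str(trm) + ","
--         maxl += len(s)
--         if maxl > maxlen: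
--             break
--         seqstr += s
--     return seqstr
-- ===== SOURCE B (Python) =====
-- def SeqString(seq: list[int], maxlen: int, offset: int = 0) -> str:
--     pieces = [str(t) + "," for t in seq[offset:]]
--     prefix = []
--     total = 0
--     for p in pieces:
--         total += len(p)
--         prefix.append(total)
--     # bisect_right(prefix, maxlen): first index with prefix[i] > maxlen
--     lo, hi = 0, len(prefix)
--     while lo < hi:
--         mid = (lo + hi) // 2
--         if maxlen < prefix[mid]:
--             hi = mid
--         else:
--             lo = mid + 1
--     return "".join(pieces[:lo])
-- ===== Notes on version B (the rewrite author's own statement) =====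
-- stated objective: alternative
-- what changed: Replaces A's accumulate-and-break string-building loop by a table decomposition: build all piece strings, a prefix-sum table of their lengths, binary-search (bisect_right) the cutoff index, and join the prefix of pieces.
import Mathlib
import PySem

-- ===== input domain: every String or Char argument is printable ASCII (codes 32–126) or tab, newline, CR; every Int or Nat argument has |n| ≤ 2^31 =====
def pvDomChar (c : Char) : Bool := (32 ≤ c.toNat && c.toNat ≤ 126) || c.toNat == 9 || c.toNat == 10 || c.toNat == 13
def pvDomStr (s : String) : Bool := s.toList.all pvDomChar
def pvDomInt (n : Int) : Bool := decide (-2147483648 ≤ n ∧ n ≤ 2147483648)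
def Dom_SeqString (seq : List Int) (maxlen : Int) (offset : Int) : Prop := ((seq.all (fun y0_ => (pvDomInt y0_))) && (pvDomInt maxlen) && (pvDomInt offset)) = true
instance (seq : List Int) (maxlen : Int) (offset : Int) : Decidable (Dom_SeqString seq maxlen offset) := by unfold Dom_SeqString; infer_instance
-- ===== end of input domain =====

-- B replaces A's accumulate-and-break loop by a pieces list + prefix-length table +
-- binary search (bisect_right) for the cutoff, then joins the prefix (objective: alternative).

-- ===== PORT A =====
-- the for-loop of A with its `break`: state (maxl, seqstr)
def pvSeqStringLoop (l : List Int) (maxlen : Int) (maxl : Int) (seqstr : String) : String :=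
  match l with
  | [] => seqstr
  | trm :: rest =>
    let s := PySem.Int.toStr trm ++ ","
    let maxl' := maxl + PySem.Str.len s
    if maxl' > maxlen then seqstr
    else pvSeqStringLoop rest maxlen maxl' (seqstr ++ s)

def SeqString (seq : List Int) (maxlen : Int) (offset : Int) : String :=
  pvSeqStringLoop (PySem.List.slice seq (some offset) none) maxlen 0 ""

-- ===== PORT B =====
-- the prefix-building loop of B: running total, appended totals returned in order
def pvPrefixLens (ps : List String) (total : Int) : List Int :=
  match ps with
  | [] => []
  | p :: rest => (total + PySem.Str.len p) :: pvPrefixLens rest (total + PySem.Str.len p)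

def SeqString_alt (seq : List Int) (maxlen : Int) (offset : Int) : String :=
  let pieces := (PySem.List.slice seq (some offset) none).map (fun t => PySem.Int.toStr t ++ ",")
  let pfx := pvPrefixLens pieces 0
  -- Source B's hand-written lo/hi loop is exactly CPython's bisect_right = PySem.List.bisectRight
  let i := PySem.List.bisectRight pfx maxlen
  PySem.Str.join "" (pieces.take i)

-- ===== PRECONDITION & SPEC =====
def Spec_SeqString (seq : List Int) (maxlen : Int) (offset : Int) (out : String) : Prop := out = SeqString_alt seq maxlen offset
instance (seq : List Int) (maxlen : Int) (offset : Int) (out : String) : Decidable (Spec_SeqString seq maxlen offset out) := by unfold Spec_SeqString; infer_instance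

-- ===== CLAIM (what is proved, stated in full; the proofs are below) =====
def Claim_equal_SeqString : Prop := ∀ (seq : List Int) (maxlen : Int) (offset : Int), Dom_SeqString seq maxlen offset → Spec_SeqString seq maxlen offset (SeqString seq maxlen offset)

-- ===== LEMMAS AND PROOFS =====

theorem pv_join_nil : PySem.Str.join "" ([] : List String) = "" := rfl

theorem pv_intercalate_nil (l : List (List Char)) : ([] : List Char).intercalate l = l.flatten := by
  induction l with
  | nil => rfl
  | cons a t ih => cases t <;> simp_all [List.intercalate, List.intersperse]

theorem pv_join_cons (a : String) (l : List String) :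
    PySem.Str.join "" (a :: l) = a ++ PySem.Str.join "" l := by
  apply String.toList_injective
  simp [PySem.Str.join, PySem.Chars.join, pv_intercalate_nil]

theorem pvPrefixLens_lb (ps : List String) (total : Int) :
    ∀ x ∈ pvPrefixLens ps total, total ≤ x := by
  induction ps generalizing total with
  | nil => simp [pvPrefixLens]
  | cons p rest ih =>
    intro x hx
    have hlen : (0 : Int) ≤ PySem.Str.len p := by
      rw [PySem.Str.len_eq]; positivity
    simp only [pvPrefixLens, List.mem_cons] at hx
    rcases hx with h | h
    · omega
    · have := ih (total + PySem.Str.len p) x h; omega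

theorem pvPrefixLens_sorted (ps : List String) (total : Int) :
    (pvPrefixLens ps total).Pairwise (· ≤ ·) := by
  induction ps generalizing total with
  | nil => simp [pvPrefixLens]
  | cons p rest ih =>
    simp only [pvPrefixLens, List.pairwise_cons]
    exact ⟨pvPrefixLens_lb rest _, ih _⟩

-- characterization of the takeWhile-prefix length
theorem pv_takeWhile_spec (p : Int → Bool) (l : List Int) :
    (l.takeWhile p).length ≤ l.length ∧
    (∀ j (hj : j < l.length), j < (l.takeWhile p).length → p l[j]) ∧
    (∀ hj : (l.takeWhile p).length < l.length, ¬ p l[(l.takeWhile p).length]) := by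
  induction l with
  | nil => simp
  | cons a t ih =>
    by_cases h : p a
    · simp only [List.takeWhile_cons, h, if_pos, List.length_cons]
      obtain ⟨h1, h2, h3⟩ := ih
      refine ⟨by omega, ?_, ?_⟩
      · intro j hj hjt
        cases j with
        | zero => simpa
        | succ k => simpa using h2 k (by omega) (by omega)
      · intro hj
        simpa using h3 (by omega)
    · simp [h]

-- bisect_right on a sorted list = length of the ≤-prefix
theorem pv_bisect_eq_takeWhile (l : List Int) (x : Int) (hs : l.Pairwise (· ≤ ·)) :
    PySem.List.bisectRight l x = (l.takeWhile (fun v => v ≤ x)).length := by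
  obtain ⟨hb1, hb2, hb3⟩ := PySem.List.bisectRight_spec l x hs
  obtain ⟨ht1, ht2, ht3⟩ := pv_takeWhile_spec (fun v => v ≤ x) l
  set r := PySem.List.bisectRight l x
  set t := (l.takeWhile (fun v => v ≤ x)).length
  rcases lt_trichotomy r t with h | h | h
  · have h1 := ht2 r (by omega) h
    have h2 := hb3 r (by omega) (by omega)
    simp only [decide_eq_true_eq] at h1; omega
  · exact h
  · have h1 := hb2 t (by omega) h
    have h2 := ht3 (by omega)
    simp only [decide_eq_true_eq] at h2; omega

-- invariant of A's loop: it appends the pieces whose running length stays ≤ maxlen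
theorem pvSeqStringLoop_eq (l : List Int) (maxlen maxl : Int) (acc : String) :
    pvSeqStringLoop l maxlen maxl acc =
      acc ++ PySem.Str.join ""
        ((l.map (fun t => PySem.Int.toStr t ++ ",")).take
          ((pvPrefixLens (l.map (fun t => PySem.Int.toStr t ++ ",")) maxl).takeWhile
            (fun v => v ≤ maxlen)).length) := by
  induction l generalizing maxl acc with
  | nil => simp [pvSeqStringLoop, pv_join_nil]
  | cons trm rest ih =>
    simp only [pvSeqStringLoop, List.map_cons, pvPrefixLens]
    by_cases h : maxl + PySem.Str.len (PySem.Int.toStr trm ++ ",") > maxlen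
    · rw [if_pos h]
      rw [List.takeWhile_cons_of_neg (by simpa using h)]
      simp [pv_join_nil]
    · rw [if_neg h]
      rw [List.takeWhile_cons_of_pos (by simp only [decide_eq_true_eq]; omega)]
      simp only [List.length_cons, List.take_succ_cons, pv_join_cons]
      rw [ih]
      rw [String.append_assoc]

-- ===== VERDICT (by name: the statement is the Claim_ definition above) =====
theorem SeqString_spec : Claim_equal_SeqString := by
  intro seq maxlen offset _
  unfold Spec_SeqString SeqString SeqString_alt
  rw [pvSeqStringLoop_eq]
  simp [pv_bisect_eq_takeWhile _ _ (pvPrefixLens_sorted _ _)]
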